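-- pv_equiv track=rewrite | github.com/samalws/aoc-2021 | D14.py | mergeEnumDicts
-- ===== SOURCE A (Python) =====
-- def mergeEnumDicts(a, b, sub):
--   d = {}
--   for k,v in a.items():
--     if k not in d: d[k] = 0
--     d[k] += v
--   for k,v in b.items():
--     if k not in d: d[k] = 0
--     d[k] += v
--   d[sub] -= 1
--   return d
-- ===== SOURCE B (Python) =====
-- def mergeEnumDicts(a, b, sub):
--   # union-overwrite merge, then a repair pass over the collisions
--   d = {**a, **b}
--   for k in b:
--     if k in a:
--       d[k] += a[k]
--   d[sub] -= 1
--   return d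
-- ===== Notes on version B (the rewrite author's own statement) =====
-- stated objective: alternative
-- what changed: Instead of A's two incremental accumulation loops into a fresh dict, B merges by dict-union overwrite d = {**a, **b} and then runs a repair pass over b's keys, adding a[k] back wherever the overwrite clobbered a colliding key, before the d[sub] -= 1 decrement.
import Mathlib
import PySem

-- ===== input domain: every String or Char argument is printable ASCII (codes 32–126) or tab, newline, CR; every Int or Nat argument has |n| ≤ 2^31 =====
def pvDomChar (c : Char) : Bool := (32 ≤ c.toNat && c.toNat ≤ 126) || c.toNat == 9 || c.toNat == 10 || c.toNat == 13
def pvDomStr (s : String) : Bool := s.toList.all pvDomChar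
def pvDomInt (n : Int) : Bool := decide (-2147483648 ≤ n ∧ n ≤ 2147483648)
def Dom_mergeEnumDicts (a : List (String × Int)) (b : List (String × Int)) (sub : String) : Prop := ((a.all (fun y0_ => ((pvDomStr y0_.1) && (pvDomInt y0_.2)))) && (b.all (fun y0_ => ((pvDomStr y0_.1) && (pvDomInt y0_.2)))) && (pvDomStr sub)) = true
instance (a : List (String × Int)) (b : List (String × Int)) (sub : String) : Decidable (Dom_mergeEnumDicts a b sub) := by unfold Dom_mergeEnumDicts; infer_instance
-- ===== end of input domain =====

-- B merges by dict-union overwrite ({**a, **b}) followed by a repair pass that re-adds a's values on colliding keys, instead of A's two in-place accumulation loops; objective: alternative decomposition, same cost.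


-- ===== PORT A =====
def mergeEnumDicts (a : List (String × Int)) (b : List (String × Int)) (sub : String) : List (String × Int) :=
  let d := ((PySem.Dict.ofList a).items).foldl
      (fun d p => d.modify p.1 0 (· + p.2)) (PySem.Dict.empty : PySem.Dict String Int)
  let d := ((PySem.Dict.ofList b).items).foldl (fun d p => d.modify p.1 0 (· + p.2)) d
  match d.get? sub with          -- d[sub] -= 1 : KeyError when sub is absent (excluded by Pre_)
  | some v => (d.insert sub (v - 1)).items
  | none => []

-- ===== PORT B =====
def mergeEnumDicts_alt (a : List (String × Int)) (b : List (String × Int)) (sub : String) : List (String × Int) :=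
  let da := PySem.Dict.ofList a
  let db := PySem.Dict.ofList b
  let d := db.items.foldl (fun d p => d.insert p.1 p.2) da          -- d = {**a, **b}
  let d := db.keys.foldl                                            -- for k in b: if k in a: d[k] += a[k]
      (fun d k => if da.contains k then d.modify k 0 (· + da.getD k 0) else d) d
  match d.get? sub with          -- d[sub] -= 1 : KeyError when sub is absent (excluded by Pre_)
  | some v => (d.insert sub (v - 1)).items
  | none => []

-- ===== PRECONDITION & SPEC =====
-- Pre_ excludes exactly the inputs on which Python's `d[sub] -= 1` raises KeyError: sub not a key of a or b.
def Pre_mergeEnumDicts (a : List (String × Int)) (b : List (String × Int)) (sub : String) : Prop :=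
  sub ∈ a.map Prod.fst ∨ sub ∈ b.map Prod.fst
instance (a : List (String × Int)) (b : List (String × Int)) (sub : String) : Decidable (Pre_mergeEnumDicts a b sub) := by unfold Pre_mergeEnumDicts; infer_instance
def pvWitness_mergeEnumDicts : (List (String × Int)) × (List (String × Int)) × String := ([("x", 1)], [("y", 2)], "x")

def Spec_mergeEnumDicts (a : List (String × Int)) (b : List (String × Int)) (sub : String) (out : List (String × Int)) : Prop := out = mergeEnumDicts_alt a b sub
instance (a : List (String × Int)) (b : List (String × Int)) (sub : String) (out : List (String × Int)) : Decidable (Spec_mergeEnumDicts a b sub out) := by unfold Spec_mergeEnumDicts; infer_instance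

-- ===== CLAIM (what is proved, stated in full; the proofs are below) =====
def Claim_equal_mergeEnumDicts : Prop := ∀ (a : List (String × Int)) (b : List (String × Int)) (sub : String), Dom_mergeEnumDicts a b sub → Pre_mergeEnumDicts a b sub → Spec_mergeEnumDicts a b sub (mergeEnumDicts a b sub)

-- ===== LEMMAS AND PROOFS =====

-- running-sum characterisation of A's modify loop
theorem getD_foldl_modify_add (l : List (String × Int)) (d : PySem.Dict String Int) (k : String) :
    (l.foldl (fun d p => d.modify p.1 0 (· + p.2)) d).getD k 0
      = d.getD k 0 + ((l.filter (fun p => p.1 == k)).map Prod.snd).sum := by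
  induction l generalizing d with
  | nil => simp
  | cons p t ih =>
    simp only [List.foldl_cons, List.filter_cons]
    rw [ih]
    by_cases h : p.1 = k
    · simp [h]; ring
    · simp [PySem.Dict.getD_modify, h, Ne.symm h]

-- on an association list with distinct keys, summing the values at k is the (first-match) lookup
theorem sum_filter_assoc (l : List (String × Int)) (h : (l.map Prod.fst).Nodup) (k : String) :
    ((l.filter (fun p => p.1 == k)).map Prod.snd).sum = (PySem.Dict.mk l).getD k 0 := by
  induction l with
  | nil => simp [PySem.Dict.getD_eq_get?_getD, PySem.Dict.get?]
  | cons p t ih =>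
    obtain ⟨pk, pv⟩ := p
    simp only [List.map_cons, List.nodup_cons] at h
    rw [PySem.Dict.getD_eq_get?_getD, PySem.Dict.get?_mk_cons]
    by_cases hk : pk = k
    · have ht : t.filter (fun q => q.1 == k) = [] := by
        rw [List.filter_eq_nil_iff]
        intro q hq
        simp only [beq_iff_eq]
        intro hqk
        exact h.1 (hk ▸ hqk ▸ List.mem_map_of_mem hq)
      simp [hk, ht]
    · have hb : (pk == k) = false := by simp [hk]
      simp only [List.filter_cons, hb, Bool.false_eq_true, if_false,
        ← PySem.Dict.getD_eq_get?_getD]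
      exact ih h.2

-- B's union-overwrite fold: lookup is the overlay's value when present, the base's otherwise
theorem get?_foldl_insert (l : List (String × Int)) (d : PySem.Dict String Int)
    (h : (l.map Prod.fst).Nodup) (k : String) :
    (l.foldl (fun d p => d.insert p.1 p.2) d).get? k
      = ((PySem.Dict.mk l).get? k).or (d.get? k) := by
  induction l generalizing d with
  | nil => simp [PySem.Dict.get?]
  | cons p t ih =>
    obtain ⟨pk, pv⟩ := p
    simp only [List.map_cons, List.nodup_cons] at h
    simp only [List.foldl_cons]
    rw [ih _ h.2, PySem.Dict.get?_mk_cons]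
    by_cases hk : pk = k
    · have ht : (PySem.Dict.mk t).get? k = none := by
        rw [PySem.Dict.get?_eq_none_iff_not_mem_keys]
        intro hm
        exact h.1 (hk ▸ hm)
      simp [hk, ht, PySem.Dict.get?_insert_self]
    · simp [hk, PySem.Dict.get?_insert_of_ne _ _ (Ne.symm hk)]

-- B's repair fold: adds da's value once for each key of l that lies in da
theorem getD_foldl_repair (da : PySem.Dict String Int) (l : List String)
    (d : PySem.Dict String Int) (h : l.Nodup) (k : String) :
    (l.foldl (fun d k => if da.contains k then d.modify k 0 (· + da.getD k 0) else d) d).getD k 0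
      = d.getD k 0 + (if k ∈ l ∧ da.contains k = true then da.getD k 0 else 0) := by
  induction l generalizing d with
  | nil => simp
  | cons x t ih =>
    simp only [List.nodup_cons] at h
    simp only [List.foldl_cons]
    rw [ih _ h.2]
    by_cases hk : k = x
    · subst hk
      have ht : k ∉ t := h.1
      by_cases hc : da.contains k = true
      · simp [hc, ht]
      · simp [hc]
    · by_cases hc : da.contains x = true
      · simp [hc, PySem.Dict.getD_modify, hk, List.mem_cons]
      · simp only [hc, Bool.false_eq_true, if_false]
        simp [List.mem_cons, hk]
    
-- the repair fold never touches the key set (every key of l is already present)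
theorem keys_foldl_repair (da : PySem.Dict String Int) (l : List String)
    (d : PySem.Dict String Int) (h : ∀ k ∈ l, k ∈ d.keys) :
    (l.foldl (fun d k => if da.contains k then d.modify k 0 (· + da.getD k 0) else d) d).keys
      = d.keys := by
  induction l generalizing d with
  | nil => rfl
  | cons x t ih =>
    simp only [List.foldl_cons]
    by_cases hc : da.contains x = true
    · simp only [hc, if_true]
      have hkeys : (d.modify x 0 (· + da.getD x 0)).keys = d.keys := by
        rw [PySem.Dict.keys_modify, PySem.Dict.keys_insert_of_contains]
        rw [PySem.Dict.contains_iff_mem_keys]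
        exact h x (List.mem_cons_self)
      rw [ih _ (fun k hk => hkeys ▸ h k (List.mem_cons_of_mem _ hk))]
      exact hkeys
    · simp only [hc, Bool.false_eq_true, if_false]
      exact ih _ (fun k hk => h k (List.mem_cons_of_mem _ hk))

-- the two merge strategies build the same dict
theorem dicts_eq (a b : List (String × Int)) :
    ((PySem.Dict.ofList b).items).foldl (fun d p => d.modify p.1 0 (· + p.2))
      (((PySem.Dict.ofList a).items).foldl (fun d p => d.modify p.1 0 (· + p.2))
        (PySem.Dict.empty : PySem.Dict String Int))
    = ((PySem.Dict.ofList b).keys).foldl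
        (fun d k => if (PySem.Dict.ofList a).contains k then
            d.modify k 0 (· + (PySem.Dict.ofList a).getD k 0) else d)
        (((PySem.Dict.ofList b).items).foldl (fun d p => d.insert p.1 p.2) (PySem.Dict.ofList a)) := by
  set da := PySem.Dict.ofList a with hda
  set db := PySem.Dict.ofList b with hdb
  have hnda : da.keys.Nodup := PySem.Dict.nodup_keys_ofList a
  have hndb : db.keys.Nodup := PySem.Dict.nodup_keys_ofList b
  -- key sets
  have hkeysA : (db.items.foldl (fun d p => d.modify p.1 0 (· + p.2))
      (da.items.foldl (fun d p => d.modify p.1 0 (· + p.2))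
        (PySem.Dict.empty : PySem.Dict String Int))).keys
      = PySem.Set.update da.keys db.keys := by
    rw [PySem.Dict.keys_foldl_modify_key db.items Prod.fst 0 (fun _ p v => v + p.2),
        PySem.Dict.keys_foldl_modify_key da.items Prod.fst 0 (fun _ p v => v + p.2)]
    simp only [PySem.Dict.keys_empty, PySem.Set.update_nil_left]
    rw [show List.map Prod.fst da.items = da.keys from rfl,
        show List.map Prod.fst db.items = db.keys from rfl,
        PySem.Set.ofList_eq_self_of_nodup _ hnda]
  have hkeys0 : (db.items.foldl (fun d p => d.insert p.1 p.2) da).keys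
      = PySem.Set.update da.keys db.keys := by
    rw [PySem.Dict.keys_foldl_insert_key db.items Prod.fst (fun _ p => p.2)]
    rfl
  have hkeysB : (db.keys.foldl
      (fun d k => if da.contains k then d.modify k 0 (· + da.getD k 0) else d)
      (db.items.foldl (fun d p => d.insert p.1 p.2) da)).keys
      = PySem.Set.update da.keys db.keys := by
    rw [keys_foldl_repair _ _ _ (by
      intro k hk
      rw [hkeys0]
      exact (PySem.Set.mem_update da.keys db.keys k).mpr (Or.inr hk))]
    exact hkeys0
  have hndA : (db.items.foldl (fun d p => d.modify p.1 0 (· + p.2))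
      (da.items.foldl (fun d p => d.modify p.1 0 (· + p.2))
        (PySem.Dict.empty : PySem.Dict String Int))).keys.Nodup := by
    apply PySem.Dict.nodup_keys_foldl_modify_key db.items Prod.fst 0 (fun _ p v => v + p.2)
    exact PySem.Dict.nodup_keys_foldl_modify_key da.items Prod.fst 0 (fun _ p v => v + p.2) _
      PySem.Dict.nodup_keys_empty
  have hndB : (db.keys.foldl
      (fun d k => if da.contains k then d.modify k 0 (· + da.getD k 0) else d)
      (db.items.foldl (fun d p => d.insert p.1 p.2) da)).keys.Nodup := by
    rw [hkeysB, ← hkeysA]; exact hndA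
  -- pointwise values agree
  have hval : ∀ k, (db.items.foldl (fun d p => d.modify p.1 0 (· + p.2))
      (da.items.foldl (fun d p => d.modify p.1 0 (· + p.2))
        (PySem.Dict.empty : PySem.Dict String Int))).getD k 0
      = (db.keys.foldl
          (fun d k => if da.contains k then d.modify k 0 (· + da.getD k 0) else d)
          (db.items.foldl (fun d p => d.insert p.1 p.2) da)).getD k 0 := by
    intro k
    rw [getD_foldl_modify_add, getD_foldl_modify_add,
        sum_filter_assoc da.items hnda k, sum_filter_assoc db.items hndb k,
        getD_foldl_repair da db.keys _ hndb k,
        PySem.Dict.getD_eq_get?_getD (db.items.foldl (fun d p => d.insert p.1 p.2) da) k 0,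
        get?_foldl_insert db.items da hndb k,
        show PySem.Dict.mk da.items = da from rfl, show PySem.Dict.mk db.items = db from rfl,
        PySem.Dict.getD_empty]
    by_cases hb : k ∈ db.keys
    · obtain ⟨v, hv⟩ : ∃ v, db.get? k = some v := by
        rcases h' : db.get? k with _ | v
        · exact absurd ((PySem.Dict.get?_eq_none_iff_not_mem_keys db k).mp h') (not_not_intro hb)
        · exact ⟨v, rfl⟩
      have hdbv : db.getD k 0 = v := by rw [PySem.Dict.getD_eq_get?_getD, hv]; rfl
      rw [hv]
      by_cases ha : da.contains k = true
      · simp [hb, ha, hdbv]; ring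
      · have ha0 : da.getD k 0 = 0 := PySem.Dict.getD_of_not_contains da 0 (by simpa using ha)
        simp [hb, ha, hdbv, ha0]
    · have hbg : db.get? k = none := (PySem.Dict.get?_eq_none_iff_not_mem_keys db k).mpr hb
      have hdb0 : db.getD k 0 = 0 := by rw [PySem.Dict.getD_eq_get?_getD, hbg]; rfl
      rw [hbg]
      simp [hb, hdb0, ← PySem.Dict.getD_eq_get?_getD]
  -- conclude
  apply PySem.Dict.ext
  rw [PySem.Dict.items_eq_map_keys _ hndA 0, PySem.Dict.items_eq_map_keys _ hndB 0,
      hkeysA, hkeysB]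
  exact List.map_congr_left (fun k _ => by rw [hval k])

-- ===== VERDICT (by name: the statement is the Claim_ definition above) =====
theorem mergeEnumDicts_spec : Claim_equal_mergeEnumDicts := by
  intro a b sub _ _
  simp only [Spec_mergeEnumDicts, mergeEnumDicts, mergeEnumDicts_alt, dicts_eq]
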